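-- pv_equiv track=rewrite | github.com/AnchalNigam/Code-Time | sameFirstLastChar.py | sameFirstLastChar
-- ===== SOURCE A (Python) =====
-- def sameFirstLastChar(string):
--   dic = {}
--   count = len(string)
--   for idx in range(len(string)):
--     if string[idx] not in dic:
--       dic[string[idx]] = [idx]
--     else:
--       dic[string[idx]].append(idx)
--   for key in list(dic.keys()):
--     keyValueLen = len(dic[key])-1
--     count += (keyValueLen*(keyValueLen+1)/2)
--
--   return int(count)
-- ===== SOURCE B (Python) =====
-- def sameFirstLastChar(string):
--   seen = {}
--   total = 0
--   for c in string:
--     total += seen.get(c, 0)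
--     seen[c] = seen.get(c, 0) + 1
--   return int(total + len(string))
-- ===== Notes on version B (the rewrite author's own statement) =====
-- stated objective: simpler
-- what changed: Replaces A's two passes (build a dict of all index lists per char, then sum keyValueLen*(keyValueLen+1)/2 over the keys) by one streaming pass that keeps only a count per char and adds the number of earlier equal chars at each position.
import Mathlib
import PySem

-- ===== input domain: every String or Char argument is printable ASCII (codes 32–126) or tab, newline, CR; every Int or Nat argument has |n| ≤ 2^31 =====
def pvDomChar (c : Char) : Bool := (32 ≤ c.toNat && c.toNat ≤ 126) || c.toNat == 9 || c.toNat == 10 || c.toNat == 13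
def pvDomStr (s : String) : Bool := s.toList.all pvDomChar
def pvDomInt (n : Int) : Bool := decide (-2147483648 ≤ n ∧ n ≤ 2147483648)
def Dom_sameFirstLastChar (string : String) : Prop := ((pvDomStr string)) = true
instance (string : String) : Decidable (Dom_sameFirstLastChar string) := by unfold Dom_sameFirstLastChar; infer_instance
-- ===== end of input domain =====

-- B replaces A's two-pass "group all indices per char, then sum k*(k+1)/2" by a single
-- streaming pass that adds, for each char, the number of earlier equal chars (objective: simpler).

-- ===== PORT A =====
-- Python's `count` becomes a float after `+= keyValueLen*(keyValueLen+1)/2` and is truncated back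
-- by `int(...)`; the product keyValueLen*(keyValueLen+1) is even, so floor division by 2 is exact
-- and gives the same integer value.
def sameFirstLastChar (string : String) : Int :=
  let chars := string.toList
  let dic : PySem.Dict Char (List Int) :=
    (PySem.List.enumerate chars).foldl
      (fun d p =>
        if d.contains p.2 = false then d.insert p.2 [p.1]
        else d.modify p.2 [] (fun l => l ++ [p.1]))   -- dic[string[idx]].append(idx); key present in this branch
      PySem.Dict.empty
  dic.keys.foldl
    (fun count key =>
      let keyValueLen : Int := ((dic.getD key []).length : Int) - 1
      count + PySem.Int.floordiv (keyValueLen * (keyValueLen + 1)) 2)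
    ((chars.length : Int))

-- ===== PORT B =====
def sameFirstLastChar_alt (string : String) : Int :=
  let r := string.toList.foldl
    (fun (st : PySem.Dict Char Int × Int) c =>
      (st.1.insert c (st.1.getD c 0 + 1), st.2 + st.1.getD c 0))
    (PySem.Dict.empty, 0)
  r.2 + (string.toList.length : Int)

-- ===== PRECONDITION & SPEC =====
def Spec_sameFirstLastChar (string : String) (out : Int) : Prop := out = sameFirstLastChar_alt string
instance (string : String) (out : Int) : Decidable (Spec_sameFirstLastChar string out) := by unfold Spec_sameFirstLastChar; infer_instance

-- ===== CLAIM (what is proved, stated in full; the proofs are below) =====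
def Claim_equal_sameFirstLastChar : Prop := ∀ (string : String), Dom_sameFirstLastChar string → Spec_sameFirstLastChar string (sameFirstLastChar string)

-- ===== LEMMAS AND PROOFS =====

-- the common reference value: Σ over the distinct chars of C(count, 2)
def pvT (l : List Char) : Int := ∑ x ∈ l.toFinset, (((l.count x).choose 2 : Nat) : Int)

theorem pvT_append_singleton (l : List Char) (c : Char) :
    pvT (l ++ [c]) = pvT l + (l.count c : Int) := by
  unfold pvT
  have hset : (l ++ [c]).toFinset = insert c (l.toFinset.erase c) := by
    ext x
    simp [List.mem_toFinset, Finset.mem_insert, Finset.mem_erase]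
    tauto
  have hcnt : ∀ x, (l ++ [c]).count x = l.count x + (if x = c then 1 else 0) := by
    intro x
    rw [List.count_append, List.count_singleton]
    by_cases hx : x = c
    · subst hx; simp
    · simp [hx, Ne.symm hx]
  rw [hset, Finset.sum_insert (by simp)]
  have hrest : ∑ x ∈ l.toFinset.erase c, (((l ++ [c]).count x).choose 2 : Int)
      = ∑ x ∈ l.toFinset.erase c, ((l.count x).choose 2 : Int) := by
    apply Finset.sum_congr rfl
    intro x hx
    have hne : x ≠ c := (Finset.mem_erase.mp hx).1
    rw [hcnt x, if_neg hne]; simp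
  rw [hrest, hcnt c, if_pos rfl]
  have hc : ((l.count c + 1).choose 2 : Int) = ((l.count c).choose 2 : Int) + (l.count c : Int) := by
    rw [Nat.choose_succ_succ]
    push_cast [Nat.choose_one_right]
    ring
  rw [hc]
  by_cases hm : c ∈ l.toFinset
  · rw [show (∑ x ∈ l.toFinset, (((l.count x).choose 2 : Nat) : Int))
        = ((l.count c).choose 2 : Int) + ∑ x ∈ l.toFinset.erase c, ((l.count x).choose 2 : Int) from
      (Finset.add_sum_erase _ _ hm).symm]
    ring
  · have h0 : l.count c = 0 := by
      simpa [List.count_eq_zero] using fun h => hm (List.mem_toFinset.mpr h)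
    rw [Finset.erase_eq_of_notMem hm]
    simp [h0]

-- A's dict-building step (the present/absent branch pair) is exactly Dict.modify
theorem pvA_step (d : PySem.Dict Char (List Int)) (p : Int × Char) :
    (if d.contains p.2 = false then d.insert p.2 [p.1]
     else d.modify p.2 [] (fun l => l ++ [p.1]))
    = d.modify p.2 [] (fun l => l ++ [p.1]) := by
  by_cases h : d.contains p.2 = false
  · rw [PySem.Dict.modify, PySem.Dict.getD_of_not_contains (h := h)]
    simp [h]
  · simp [h]

-- A's per-key float formula (n-1)*n/2, evaluated by exact floor division, is C(n, 2)
theorem pv_tri (n : Nat) :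
    PySem.Int.floordiv (((n : Int) - 1) * (((n : Int) - 1) + 1)) 2 = ((n.choose 2 : Nat) : Int) := by
  cases n with
  | zero => decide
  | succ m =>
    have h1 : (((m+1 : Nat) : Int) - 1) * ((((m+1 : Nat) : Int) - 1) + 1) = ((m * (m+1) : Nat) : Int) := by
      push_cast; ring
    rw [h1]
    rw [show ((2:Int) = ((2:Nat):Int)) from rfl, PySem.Int.floordiv_natCast]
    congr 1
    rw [Nat.choose_two_right]
    simp [Nat.mul_comm]

theorem pvA_eq (string : String) :
    sameFirstLastChar string = (string.toList.length : Int) + pvT string.toList := by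
  unfold sameFirstLastChar
  set l := string.toList with hl
  simp only [pvA_step]
  set e := PySem.List.enumerate l 0 with he
  have hdic : e.foldl (fun d p => d.modify p.2 [] (fun v => v ++ [p.1])) PySem.Dict.empty
      = (e.map Prod.swap).foldl (fun d q => d.modify q.1 [] (fun v => v ++ [q.2])) PySem.Dict.empty := by
    rw [List.foldl_map]
    rfl
  set dic := e.foldl (fun d p => d.modify p.2 [] (fun v => v ++ [p.1])) PySem.Dict.empty with hd
  have hkeys : dic.keys = PySem.Set.ofList l := by
    rw [hd, PySem.Dict.keys_foldl_modify_key e (fun p => p.2) [] (fun d p => fun v => v ++ [p.1])]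
    rw [PySem.List.map_snd_enumerate]
    simp [PySem.Dict.keys_empty, PySem.Set.update, PySem.Set.ofList_eq_foldl]
  have hgetD : ∀ c : Char, (dic.getD c []).length = l.count c := by
    intro c
    rw [show dic = _ from hdic, PySem.Dict.getD_foldl_modify_append]
    simp only [PySem.Dict.getD_empty, List.nil_append, List.length_map]
    rw [← List.countP_eq_length_filter, List.countP_map]
    rw [← PySem.List.map_snd_enumerate l 0, List.count_eq_countP, List.countP_map]
    rfl
  rw [PySem.List.foldl_add _ (fun key =>
      PySem.Int.floordiv ((((dic.getD key []).length : Int) - 1) * ((((dic.getD key []).length : Int) - 1) + 1)) 2)]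
  congr 1
  rw [hkeys]
  have hfun : (fun key => PySem.Int.floordiv ((((dic.getD key []).length : Int) - 1) * ((((dic.getD key []).length : Int) - 1) + 1)) 2)
      = fun c => (((l.count c).choose 2 : Nat) : Int) := by
    funext c
    rw [hgetD c, pv_tri]
  rw [hfun]
  rw [pvT, ← List.sum_toFinset _ (PySem.Set.nodup_ofList l)]
  congr 1
  ext x
  simp [List.mem_toFinset, PySem.Set.mem_ofList]

-- B's single pass: the dict is Counter(prefix) and the running total is pvT(prefix)
theorem pvB_fold (l : List Char) :
    l.foldl (fun (st : PySem.Dict Char Int × Int) c =>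
      (st.1.insert c (st.1.getD c 0 + 1), st.2 + st.1.getD c 0)) (PySem.Dict.empty, 0)
    = (PySem.Dict.counter l, pvT l) := by
  induction l using List.reverseRecOn with
  | nil => simp [PySem.Dict.counter, pvT]
  | append_singleton l c ih =>
    rw [List.foldl_append, ih]
    simp only [List.foldl_cons, List.foldl_nil]
    refine Prod.ext ?_ ?_
    · show (PySem.Dict.counter l).insert c ((PySem.Dict.counter l).getD c 0 + 1) = PySem.Dict.counter (l ++ [c])
      rw [← PySem.Dict.foldl_insert_getD_add_one_eq_counter, ← PySem.Dict.foldl_insert_getD_add_one_eq_counter,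
          List.foldl_append]
      simp
    · show pvT l + (PySem.Dict.counter l).getD c 0 = pvT (l ++ [c])
      rw [PySem.Dict.getD_counter, pvT_append_singleton]

theorem pvB_eq (string : String) :
    sameFirstLastChar_alt string = pvT string.toList + (string.toList.length : Int) := by
  unfold sameFirstLastChar_alt
  rw [pvB_fold]

-- ===== VERDICT (by name: the statement is the Claim_ definition above) =====
theorem sameFirstLastChar_spec : Claim_equal_sameFirstLastChar := by
  intro s _
  unfold Spec_sameFirstLastChar
  rw [pvA_eq, pvB_eq, add_comm]
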